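-- pv_equiv track=rewrite | github.com/Techtony96/2023-Google-Beginners-Quest | 0000/Challenge3.py | getKeySequenceNoDuplicates
-- ===== SOURCE A (Python) =====
-- from string import ascii_uppercase as ascii_upper
--
-- def getKeySequenceNoDuplicates(key):
--     key = key.upper()
--     seq = [None] * len(key)
--     count = 0
--     for c in ascii_upper:
--         if c in key:
--             # key = key.replace(c, str(count))
--             for index in [i for i in range(len(key)) if key[i] == c]:
--                 seq[index] = count
--                 count+=1
--     return seq
-- ===== SOURCE B (Python) =====
-- def getKeySequenceNoDuplicates(key):
--     k = key.upper()
--     seq = []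
--     for i, c in enumerate(k):
--         if 'A' <= c <= 'Z':
--             seq.append(sum(1 for j, d in enumerate(k)
--                            if 'A' <= d <= 'Z' and (d < c or (d == c and j < i))))
--         else:
--             seq.append(None)
--     return seq
-- ===== Notes on version B (the rewrite author's own statement) =====
-- stated objective: alternative
-- what changed: B replaces A's 26-pass alphabet sweep with in-place rank assignment by a direct per-position count of the (letter, index) pairs that precede it in (char, index) order.
-- outside the precondition, e.g. on getKeySequenceNoDuplicates('a b'): A returns [0, None, 1], B returns [0, None, 1]
import Mathlib
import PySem

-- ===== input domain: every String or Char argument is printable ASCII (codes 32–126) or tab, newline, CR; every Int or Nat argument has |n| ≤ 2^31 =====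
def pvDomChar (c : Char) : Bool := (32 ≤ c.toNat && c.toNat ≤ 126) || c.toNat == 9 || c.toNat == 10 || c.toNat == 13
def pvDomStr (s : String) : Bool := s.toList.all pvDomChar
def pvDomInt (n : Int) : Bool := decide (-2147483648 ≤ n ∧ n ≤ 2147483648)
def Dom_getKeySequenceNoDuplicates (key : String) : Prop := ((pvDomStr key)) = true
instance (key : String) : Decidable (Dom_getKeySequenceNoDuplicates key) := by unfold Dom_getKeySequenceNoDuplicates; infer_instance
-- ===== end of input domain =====

-- B ranks each position directly by counting smaller (letter, index) pairs, replacing A's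
-- 26-pass alphabet sweep with a per-position count (alternative algorithm, similar cost).


-- ===== PORT A =====
-- string.ascii_uppercase
def pvAZ : List Char :=
  ['A','B','C','D','E','F','G','H','I','J','K','L','M',
   'N','O','P','Q','R','S','T','U','V','W','X','Y','Z']

-- the inner loop body: seq[index] = count; count += 1
def pvInner (st : List (Option Int) × Int) (index : Nat) : List (Option Int) × Int :=
  (st.1.set index (some st.2), st.2 + 1)

-- one iteration of 'for c in ascii_upper' (key[i] is in range since i < len(key))
def pvBody (k : List Char) (st : List (Option Int) × Int) (c : Char) : List (Option Int) × Int :=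
  if PySem.Chars.isIn [c] k then
    ((List.range k.length).filter (fun i => k.getD i ' ' == c)).foldl pvInner st
  else st

-- Under Pre_ every seq entry is an int; the final '.map (·.getD 0)' is only the
-- Option Int → Int typing shim (no 'none' remains on inputs satisfying Pre_).
def getKeySequenceNoDuplicates (key : String) : List Int :=
  let k := PySem.Chars.upper key.toList
  let r := pvAZ.foldl (pvBody k) (List.replicate k.length (none : Option Int), (0 : Int))
  r.1.map (fun o => o.getD 0)

-- ===== PORT B =====
-- sum(1 for j, d in enumerate(k) if 'A' <= d <= 'Z' and (d < c or (d == c and j < i)))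
-- (the 0/1-sum is the length of the filtered enumeration; 'A' <= d <= 'Z' is Chars.isupper)
def pvAltRank (k : List Char) (i : Int) (c : Char) : Int :=
  (((PySem.List.enumerate k).filter
      (fun q => PySem.Chars.isupper q.2 && (decide (q.2 < c) || (q.2 == c && decide (q.1 < i))))).length : Int)

-- Same typing shim as in port A: under Pre_ no 'none' is ever appended.
def getKeySequenceNoDuplicates_alt (key : String) : List Int :=
  let k := PySem.Chars.upper key.toList
  let seq := (PySem.List.enumerate k).foldl
    (fun acc p =>
      if PySem.Chars.isupper p.2 then acc ++ [some (pvAltRank k p.1 p.2)]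
      else acc ++ [(none : Option Int)])
    ([] : List (Option Int))
  seq.map (fun o => o.getD 0)

-- ===== PRECONDITION & SPEC =====
-- Pre_ excludes keys containing any non-letter character: there A's Python returns a list
-- with None entries, which is not a value of the declared return type List Int.
def Pre_getKeySequenceNoDuplicates (key : String) : Prop :=
  (key.toList.all PySem.Chars.isalpha) = true
instance (key : String) : Decidable (Pre_getKeySequenceNoDuplicates key) := by
  unfold Pre_getKeySequenceNoDuplicates; infer_instance

def pvWitness_getKeySequenceNoDuplicates : String := "baNana"

def Spec_getKeySequenceNoDuplicates (key : String) (out : List Int) : Prop :=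
  out = getKeySequenceNoDuplicates_alt key
instance (key : String) (out : List Int) : Decidable (Spec_getKeySequenceNoDuplicates key out) := by
  unfold Spec_getKeySequenceNoDuplicates; infer_instance

-- ===== CLAIM (what is proved, stated in full; the proofs are below) =====
def Claim_equal_getKeySequenceNoDuplicates : Prop :=
  ∀ (key : String), Dom_getKeySequenceNoDuplicates key → Pre_getKeySequenceNoDuplicates key →
    Spec_getKeySequenceNoDuplicates key (getKeySequenceNoDuplicates key)

-- ===== LEMMAS AND PROOFS =====

-- the common value: position i is ranked by the number of positions j with (k[j], j) < (k[i], i)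
def pvRank (k : List Char) (i : Nat) : Int :=
  (((List.range k.length).filter
      (fun j => decide (k.getD j ' ' < k.getD i ' ') ||
                (k.getD j ' ' == k.getD i ' ' && decide (j < i)))).length : Int)

lemma pv_char_le (a b : Char) : a ≤ b ↔ a.toNat ≤ b.toNat := by
  rw [Char.le_def]; exact UInt32.le_iff_toNat_le

lemma pv_mem_AZ {c : Char} (h1 : 'A' ≤ c) (h2 : c ≤ 'Z') : c ∈ pvAZ := by
  have h65 : 65 ≤ c.toNat := (pv_char_le _ _).mp h1
  have h90 : c.toNat ≤ 90 := (pv_char_le _ _).mp h2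
  rw [← Char.ofNat_toNat c]
  interval_cases h : c.toNat <;> decide

lemma pv_upper_isupper {c : Char} (h : PySem.Chars.isalpha c = true) :
    PySem.Chars.isupper (PySem.Chars.upperChar c) = true := by
  unfold PySem.Chars.isalpha at h
  unfold PySem.Chars.upperChar
  by_cases hl : PySem.Chars.islower c = true
  · rw [if_pos hl]
    unfold PySem.Chars.islower at hl
    simp only [Bool.and_eq_true, decide_eq_true_eq] at hl
    have h97 : 97 ≤ c.toNat := (pv_char_le _ _).mp hl.1
    have h122 : c.toNat ≤ 122 := (pv_char_le _ _).mp hl.2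
    have hv : (Char.ofNat (c.toNat - 32)).toNat = c.toNat - 32 := by
      rw [Char.toNat_ofNat, if_pos]
      left; omega
    unfold PySem.Chars.isupper
    simp only [Bool.and_eq_true, decide_eq_true_eq, pv_char_le, hv]
    constructor <;> [show 65 ≤ _; show _ ≤ 90] <;> omega
  · rw [if_neg hl]
    simp only [hl, Bool.or_false] at h
    exact h

lemma pv_filter_or_length {α : Type} (l : List α) (p q : α → Bool)
    (h : ∀ x ∈ l, ¬(p x = true ∧ q x = true)) :
    (l.filter (fun x => p x || q x)).length = (l.filter p).length + (l.filter q).length := by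
  induction l with
  | nil => simp
  | cons a l ih =>
    have ha := h a (List.mem_cons_self ..)
    have ih' := ih (fun x hx => h x (List.mem_cons_of_mem _ hx))
    by_cases hp : p a = true <;> by_cases hq : q a = true
    · exact absurd ⟨hp, hq⟩ ha
    all_goals simp [hp, hq, ih']
    all_goals omega

lemma pv_inner_spec (L : List Nat) (hL : L.Pairwise (· < ·)) :
    ∀ (s : List (Option Int)) (c0 : Int),
    (L.foldl pvInner (s, c0)).2 = c0 + L.length ∧
    (L.foldl pvInner (s, c0)).1.length = s.length ∧
    ∀ i, i < s.length →
      (L.foldl pvInner (s, c0)).1[i]? =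
        if i ∈ L then some (some (c0 + ((L.filter (fun j => decide (j < i))).length : Int)))
        else s[i]? := by
  induction L with
  | nil => intro s c0; simp
  | cons a L ih =>
    intro s c0
    have ha : ∀ b ∈ L, a < b := (List.pairwise_cons.mp hL).1
    have hL' := (List.pairwise_cons.mp hL).2
    have ihh := ih hL' (s.set a (some c0)) (c0 + 1)
    have hfold : (a :: L).foldl pvInner (s, c0) = L.foldl pvInner (s.set a (some c0), c0 + 1) := rfl
    rw [hfold]
    have hlen : (s.set a (some c0)).length = s.length := List.length_set ..
    refine ⟨by rw [ihh.1]; simp only [List.length_cons]; push_cast; omega, by rw [ihh.2.1, hlen], ?_⟩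
    intro i hi
    rw [ihh.2.2 i (by rw [hlen]; exact hi)]
    by_cases hmem : i ∈ L
    · have hai : a < i := ha i hmem
      rw [if_pos hmem, if_pos (List.mem_cons_of_mem _ hmem)]
      have : (a :: L).filter (fun j => decide (j < i)) = a :: L.filter (fun j => decide (j < i)) := by
        simp [hai]
      rw [this]
      simp only [List.length_cons]
      congr 2
      push_cast
      omega
    · rw [if_neg hmem]
      by_cases hia : i = a
      · subst hia
        have hnot : i ∉ L := fun hmem' => absurd (ha i hmem') (lt_irrefl i)
        rw [if_pos (List.mem_cons_self ..)]
        rw [List.getElem?_set_self (by exact hi)]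
        have : (i :: L).filter (fun j => decide (j < i)) = [] := by
          rw [List.filter_eq_nil_iff]
          intro b hb
          rcases List.mem_cons.mp hb with h | h
          · subst h; simp
          · have := ha b h; simp; omega
        rw [this]
        simp
      · rw [if_neg (by simp [hia, hmem])]
        rw [List.getElem?_set_ne (by omega)]

lemma pv_outer_spec (k : List Char) (ds : List Char) :
    ds.Pairwise (· < ·) →
    ∀ (done : Char → Bool) (s : List (Option Int)) (c0 : Int),
    s.length = k.length →
    (∀ e, done e = true → ∀ d ∈ ds, e < d) →
    (∀ d ∈ ds, done d = false) →
    (∀ j, j < k.length → done (k.getD j ' ') = true ∨ k.getD j ' ' ∈ ds) →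
    c0 = (((List.range k.length).filter (fun j => done (k.getD j ' '))).length : Int) →
    (∀ i, i < k.length →
      s[i]? = some (if done (k.getD i ' ') then some (pvRank k i) else none)) →
    (ds.foldl (pvBody k) (s, c0)).1.length = k.length ∧
    ∀ i, i < k.length →
      (ds.foldl (pvBody k) (s, c0)).1[i]? = some (some (pvRank k i)) := by
  induction ds with
  | nil =>
    intro _ done s c0 hs _ _ hcover _ hseq
    simp only [List.foldl_nil]
    refine ⟨hs, ?_⟩
    intro i hi
    have hd : done (k.getD i ' ') = true := by
      rcases hcover i hi with h | h
      · exact h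
      · cases h
    rw [hseq i hi, hd, if_pos rfl]
  | cons c ds ih =>
    intro hsort done s c0 hs hdone_lt hdisj hcover hcount hseq
    have hcd : ∀ d ∈ ds, c < d := (List.pairwise_cons.mp hsort).1
    have hsort' := (List.pairwise_cons.mp hsort).2
    have hdc : done c = false := hdisj c (List.mem_cons_self ..)
    by_cases hin : PySem.Chars.isIn [c] k = true
    · -- c occurs in the key: run the inner assignment loop
      have hfold : (c :: ds).foldl (pvBody k) (s, c0) =
          ds.foldl (pvBody k)
            (((List.range k.length).filter (fun i => k.getD i ' ' == c)).foldl pvInner (s, c0)) := by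
        simp only [List.foldl_cons, pvBody, if_pos hin]
      set L := (List.range k.length).filter (fun i => k.getD i ' ' == c) with hLdef
      have hLp : L.Pairwise (· < ·) := List.pairwise_lt_range.filter _
      obtain ⟨hc2, hlen, hidx⟩ := pv_inner_spec L hLp s c0
      have hmemL : ∀ i, i < k.length → (i ∈ L ↔ k.getD i ' ' = c) := by
        intro i hi
        rw [hLdef, List.mem_filter, List.mem_range]
        constructor
        · exact fun h => beq_iff_eq.mp h.2
        · exact fun h => ⟨hi, beq_iff_eq.mpr h⟩
      have hdlt : ∀ j, j < k.length → done (k.getD j ' ') = decide (k.getD j ' ' < c) := by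
        intro j hj
        by_cases hlt : k.getD j ' ' < c
        · rcases hcover j hj with h | h
          · rw [h, decide_eq_true hlt]
          · rcases List.mem_cons.mp h with h | h
            · rw [h] at hlt; exact absurd hlt (lt_irrefl _)
            · exact absurd hlt (not_lt_of_gt (hcd _ h))
        · have hnd : done (k.getD j ' ') = false := by
            by_contra hne
            exact hlt (hdone_lt _ (Bool.of_not_eq_false hne) c (List.mem_cons_self ..))
          rw [hnd, decide_eq_false hlt]
      set done' : Char → Bool := fun e => done e || e == c with hdone'
      have hdisjpq : ∀ j ∈ List.range k.length,
          ¬(done (k.getD j ' ') = true ∧ (k.getD j ' ' == c) = true) := by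
        intro j _ h
        obtain ⟨h1, h2⟩ := h
        rw [beq_iff_eq] at h2
        rw [h2, hdc] at h1
        exact Bool.false_ne_true h1
      have hcount' : c0 + (L.length : Int) =
          (((List.range k.length).filter (fun j => done' (k.getD j ' '))).length : Int) := by
        have hor := pv_filter_or_length (List.range k.length)
          (fun j => done (k.getD j ' ')) (fun j => k.getD j ' ' == c) hdisjpq
        have : (List.range k.length).filter (fun j => done' (k.getD j ' ')) =
            (List.range k.length).filter
              (fun j => done (k.getD j ' ') || (k.getD j ' ' == c)) := rfl
        rw [this, hor, hcount, hLdef]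
        push_cast
        ring
      have happ := ih hsort' done'
        (L.foldl pvInner (s, c0)).1 (c0 + L.length)
        (by rw [hlen, hs])
        (by
          intro e he d hd
          rcases Bool.or_eq_true_iff.mp he with h | h
          · exact hdone_lt e h d (List.mem_cons_of_mem _ hd)
          · rw [beq_iff_eq] at h; rw [h]; exact hcd d hd)
        (by
          intro d hd
          show (done d || (d == c)) = false
          have h1 : done d = false := hdisj d (List.mem_cons_of_mem _ hd)
          have h2 : (d == c) = false := by
            rw [beq_eq_false_iff_ne]
            exact fun h => absurd (h ▸ hcd d hd) (lt_irrefl _)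
          rw [h1, h2, Bool.or_false])
        (by
          intro j hj
          rcases hcover j hj with h | h
          · exact Or.inl (by show (done _ || _) = true; rw [h, Bool.true_or])
          · rcases List.mem_cons.mp h with h | h
            · exact Or.inl (by
                show (done _ || (k.getD j ' ' == c)) = true
                rw [beq_iff_eq.mpr h, Bool.or_true])
            · exact Or.inr h)
        hcount'
        (by
          intro i hi
          rw [hidx i (by rw [hs]; exact hi)]
          by_cases him : i ∈ L
          · have hkc : k.getD i ' ' = c := (hmemL i hi).mp him
            have hdone'i : done' (k.getD i ' ') = true := by
              show (done _ || (k.getD i ' ' == c)) = true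
              rw [beq_iff_eq.mpr hkc, Bool.or_true]
            rw [if_pos him, hdone'i, if_pos rfl]
            have hrank : pvRank k i = c0 + ((L.filter (fun j => decide (j < i))).length : Int) := by
              unfold pvRank
              rw [hkc]
              have hor := pv_filter_or_length (List.range k.length)
                (fun j => decide (k.getD j ' ' < c))
                (fun j => k.getD j ' ' == c && decide (j < i))
                (by
                  intro j _ h
                  obtain ⟨h1, h2⟩ := h
                  rw [decide_eq_true_eq] at h1
                  rw [Bool.and_eq_true, beq_iff_eq] at h2
                  rw [h2.1] at h1
                  exact absurd h1 (lt_irrefl _))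
              rw [hor]
              have hfc : (List.range k.length).filter (fun j => decide (k.getD j ' ' < c)) =
                  (List.range k.length).filter (fun j => done (k.getD j ' ')) := by
                apply List.filter_congr
                intro j hj
                exact (hdlt j (List.mem_range.mp hj)).symm
              have hff : L.filter (fun j => decide (j < i)) =
                  (List.range k.length).filter (fun j => k.getD j ' ' == c && decide (j < i)) := by
                rw [hLdef, List.filter_filter]
                exact List.filter_congr (fun x _ => by rw [Bool.and_comm])
              rw [hfc, ← hff, hcount]
              push_cast
              ring
            rw [hrank]
          · have hkc : k.getD i ' ' ≠ c := fun h => him ((hmemL i hi).mpr h)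
            have hdone'i : done' (k.getD i ' ') = done (k.getD i ' ') := by
              show (done _ || (k.getD i ' ' == c)) = done (k.getD i ' ')
              rw [beq_eq_false_iff_ne.mpr hkc, Bool.or_false]
            rw [if_neg him, hseq i hi, hdone'i])
      have hpair : L.foldl pvInner (s, c0) =
          ((L.foldl pvInner (s, c0)).1, c0 + (L.length : Int)) := by
        rw [← hc2]
      rw [hfold, hpair]
      exact happ
    · -- c does not occur in the key: the state is unchanged
      have hfold : (c :: ds).foldl (pvBody k) (s, c0) = ds.foldl (pvBody k) (s, c0) := by
        simp only [List.foldl_cons, pvBody, if_neg hin]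
      have hck : c ∉ k := by
        intro hmem
        exact hin ((PySem.Chars.isIn_iff_infix _ _).mpr ((List.singleton_infix_iff _ _).mpr hmem))
      have hnck : ∀ j, j < k.length → k.getD j ' ' ≠ c := by
        intro j hj h
        apply hck
        rw [← h, List.getD_eq_getElem _ _ hj]
        exact List.getElem_mem _
      rw [hfold]
      exact ih hsort' done s c0 hs
        (fun e he d hd => hdone_lt e he d (List.mem_cons_of_mem _ hd))
        (fun d hd => hdisj d (List.mem_cons_of_mem _ hd))
        (by
          intro j hj
          rcases hcover j hj with h | h
          · exact Or.inl h
          · rcases List.mem_cons.mp h with h | h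
            · exact absurd h (hnck j hj)
            · exact Or.inr h)
        hcount hseq

lemma pv_k_upper (key : String) (hpre : Pre_getKeySequenceNoDuplicates key) :
    ∀ j < (PySem.Chars.upper key.toList).length,
      PySem.Chars.isupper ((PySem.Chars.upper key.toList).getD j ' ') = true := by
  intro j hj
  have hj' : j < key.toList.length := by
    simpa [PySem.Chars.upper] using hj
  rw [List.getD_eq_getElem _ _ hj]
  simp only [PySem.Chars.upper, List.getElem_map]
  exact pv_upper_isupper (List.all_eq_true.mp hpre _ (List.getElem_mem _))

lemma pv_A_eq (key : String) (hpre : Pre_getKeySequenceNoDuplicates key) :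
    getKeySequenceNoDuplicates key =
      (List.range (PySem.Chars.upper key.toList).length).map
        (fun i => pvRank (PySem.Chars.upper key.toList) i) := by
  show ((pvAZ.foldl (pvBody (PySem.Chars.upper key.toList))
      (List.replicate (PySem.Chars.upper key.toList).length (none : Option Int), (0 : Int))).1.map
        (fun o => o.getD 0)) = _
  set k := PySem.Chars.upper key.toList with hk
  have h := pv_outer_spec k pvAZ (by decide) (fun _ => false)
    (List.replicate k.length (none : Option Int)) 0
    (List.length_replicate)
    (by intro e he; cases he)
    (fun d _ => rfl)
    (by
      intro j hj
      right
      have hu := pv_k_upper key hpre j hj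
      rw [PySem.Chars.isupper, Bool.and_eq_true, decide_eq_true_eq, decide_eq_true_eq] at hu
      exact pv_mem_AZ hu.1 hu.2)
    (by rw [List.filter_false]; rfl)
    (by
      intro i hi
      rw [List.getElem?_replicate, if_pos hi]
      rfl)
  have hlist : (pvAZ.foldl (pvBody k)
      (List.replicate k.length (none : Option Int), (0 : Int))).1 =
      (List.range k.length).map (fun i => some (pvRank k i)) := by
    apply List.ext_getElem?
    intro i
    by_cases hi : i < k.length
    · rw [h.2 i hi, List.getElem?_map, List.getElem?_range hi]
      rfl
    · rw [List.getElem?_eq_none (by rw [h.1]; omega),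
        List.getElem?_eq_none (by rw [List.length_map, List.length_range]; omega)]
  rw [hlist, List.map_map]
  rfl

lemma pv_enum (k : List Char) :
    PySem.List.enumerate k =
      (List.range k.length).map (fun (j : Nat) => ((j : Int), k.getD j ' ')) := by
  apply List.ext_getElem?
  intro j
  rw [PySem.List.getElem?_enumerate, List.getElem?_map]
  by_cases hj : j < k.length
  · rw [List.getElem?_range hj, List.getElem?_eq_getElem hj]
    simp [List.getD, List.getElem?_eq_getElem hj]
  · rw [List.getElem?_eq_none (by omega),
      List.getElem?_eq_none (by rw [List.length_range]; omega)]
    rfl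

lemma pv_altRank_eq (k : List Char)
    (hAZ : ∀ j < k.length, PySem.Chars.isupper (k.getD j ' ') = true)
    (i : Nat) (_hi : i < k.length) :
    pvAltRank k (i : Int) (k.getD i ' ') = pvRank k i := by
  unfold pvAltRank pvRank
  rw [pv_enum, List.filter_map, List.length_map]
  norm_cast
  apply congrArg List.length
  apply List.filter_congr
  intro j hj
  have hj' := List.mem_range.mp hj
  have hu := hAZ j hj'
  simp only [Function.comp_apply, hu, Bool.true_and, Nat.cast_lt]

lemma pv_B_eq (key : String) (hpre : Pre_getKeySequenceNoDuplicates key) :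
    getKeySequenceNoDuplicates_alt key =
      (List.range (PySem.Chars.upper key.toList).length).map
        (fun i => pvRank (PySem.Chars.upper key.toList) i) := by
  show (((PySem.List.enumerate (PySem.Chars.upper key.toList)).foldl
      (fun acc p =>
        if PySem.Chars.isupper p.2 then
          acc ++ [some (pvAltRank (PySem.Chars.upper key.toList) p.1 p.2)]
        else acc ++ [(none : Option Int)])
      ([] : List (Option Int))).map (fun o => o.getD 0)) = _
  set k := PySem.Chars.upper key.toList with hk
  have hAZ := pv_k_upper key hpre
  have hfun : (fun (acc : List (Option Int)) (p : Int × Char) =>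
      if PySem.Chars.isupper p.2 then acc ++ [some (pvAltRank k p.1 p.2)]
      else acc ++ [(none : Option Int)]) =
      fun acc p => acc ++ [if PySem.Chars.isupper p.2 then some (pvAltRank k p.1 p.2) else none] := by
    funext acc p
    by_cases h : PySem.Chars.isupper p.2 = true <;> simp [h]
  rw [hfun, PySem.List.foldl_append_singleton_eq_map, List.nil_append, pv_enum, List.map_map,
    List.map_map]
  apply List.map_congr_left
  intro i hi
  have hi' := List.mem_range.mp hi
  have hu := hAZ i hi'
  simp only [Function.comp_apply]
  rw [hu, if_pos rfl, pv_altRank_eq k hAZ i hi']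
  rfl

-- ===== VERDICT (by name: the statement is the Claim_ definition above) =====
theorem getKeySequenceNoDuplicates_spec : Claim_equal_getKeySequenceNoDuplicates := by
  intro key _ hpre
  unfold Spec_getKeySequenceNoDuplicates
  rw [pv_A_eq key hpre, pv_B_eq key hpre]
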